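-- pv_equiv track=rewrite | github.com/aonao44/proun-kata | src/kana/mapping.py | _next_content_cache
-- ===== SOURCE A (Python) =====
-- from collections.abc import Iterable, Iterator, Sequence
--
-- SILENCE_LABELS = {"<SP>", "SP", "SIL", "NSN"}
--
-- def _next_content_cache(
--     phones: Sequence[str],
--     canonical: Sequence[str],
-- ) -> tuple[list[str | None], list[str | None]]:
--     next_content: list[str | None] = [None] * len(phones)
--     next_canonical: list[str | None] = [None] * len(phones)
--     ahead_symbol: str | None = None
--     ahead_canonical: str | None = None
--     for idx in range(len(phones) - 1, -1, -1):
--         symbol = phones[idx]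
--         next_content[idx] = ahead_symbol
--         next_canonical[idx] = ahead_canonical
--         if symbol not in SILENCE_LABELS:
--             ahead_symbol = symbol
--             ahead_canonical = canonical[idx] if idx < len(canonical) else None
--     return next_content, next_canonical
-- ===== SOURCE B (Python) =====
-- SILENCE_LABELS = {"<SP>", "SP", "SIL", "NSN"}
--
-- def _next_content_cache(phones, canonical):
--     # Forward block-building pass: for each content position j, the positions
--     # [prev, j) (prev = previous content index, initially 0) all have phones[j]
--     # as their next content; positions from the last content index on stay None.
--     n = len(phones)
--     next_content = []
--     next_canonical = []
--     prev = 0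
--     for j, p in enumerate(phones):
--         if p in SILENCE_LABELS:
--             continue
--         can = canonical[j] if j < len(canonical) else None
--         next_content.extend([p] * (j - prev))
--         next_canonical.extend([can] * (j - prev))
--         prev = j
--     next_content.extend([None] * (n - prev))
--     next_canonical.extend([None] * (n - prev))
--     return next_content, next_canonical
-- ===== Notes on version B (the rewrite author's own statement) =====
-- stated objective: alternative
-- what changed: Replaces the single backward carry pass that writes every cell of two preallocated arrays with a forward pass over content positions that appends whole constant blocks (positions between consecutive content indices share one lookahead value), leaving the tail after the last content index unfilled.
import Mathlib
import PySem

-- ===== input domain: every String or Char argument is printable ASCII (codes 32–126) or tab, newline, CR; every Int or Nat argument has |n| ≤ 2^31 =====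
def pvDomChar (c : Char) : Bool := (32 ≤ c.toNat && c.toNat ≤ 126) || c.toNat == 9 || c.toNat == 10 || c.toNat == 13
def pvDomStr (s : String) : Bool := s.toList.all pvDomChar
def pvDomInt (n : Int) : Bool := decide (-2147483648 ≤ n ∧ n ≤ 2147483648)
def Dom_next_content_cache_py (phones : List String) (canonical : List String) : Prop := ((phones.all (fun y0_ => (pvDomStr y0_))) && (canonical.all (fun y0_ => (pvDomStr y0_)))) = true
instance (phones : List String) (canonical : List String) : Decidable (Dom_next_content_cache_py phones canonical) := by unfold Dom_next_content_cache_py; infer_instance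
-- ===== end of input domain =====

-- B replaces A's backward carry over preallocated arrays with a forward
-- block-appending pass over content positions (alternative decomposition, same cost).


-- ===== PORT A =====
-- membership in SILENCE_LABELS = {"<SP>", "SP", "SIL", "NSN"}
def pvSilence (s : String) : Bool := s == "<SP>" || s == "SP" || s == "SIL" || s == "NSN"

-- one iteration of A's backward loop body (state: next_content, next_canonical, ahead_symbol, ahead_canonical)
def pvAStep (phones : List String) (canonical : List String)
    (st : List (Option String) × List (Option String) × Option String × Option String)
    (idx : Int) : List (Option String) × List (Option String) × Option String × Option String :=
  let symbol := PySem.List.pyGetD phones idx ""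
  let nc := PySem.List.pySetD st.1 idx st.2.2.1
  let ncan := PySem.List.pySetD st.2.1 idx st.2.2.2
  if pvSilence symbol then (nc, ncan, st.2.2.1, st.2.2.2)
  else (nc, ncan, some symbol,
        if idx < (canonical.length : Int) then PySem.List.pyGet? canonical idx else none)

def next_content_cache_py (phones : List String) (canonical : List String) :
    List (Option String) × List (Option String) :=
  let n := phones.length
  let r := (PySem.List.pyRange ((n : Int) - 1) (-1) (-1)).foldl (pvAStep phones canonical)
      (List.replicate n (none : Option String), List.replicate n (none : Option String),
       (none : Option String), (none : Option String))
  (r.1, r.2.1)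

-- ===== PORT B =====
-- one iteration of B's forward loop (state: next_content, next_canonical, prev)
def pvBStep (canonical : List String)
    (st : List (Option String) × List (Option String) × Int)
    (jp : Int × String) : List (Option String) × List (Option String) × Int :=
  if pvSilence jp.2 then st
  else
    let can := if jp.1 < (canonical.length : Int) then PySem.List.pyGet? canonical jp.1 else none
    (st.1 ++ List.replicate (jp.1 - st.2.2).toNat (some jp.2),
     st.2.1 ++ List.replicate (jp.1 - st.2.2).toNat can, jp.1)

def next_content_cache_py_alt (phones : List String) (canonical : List String) :
    List (Option String) × List (Option String) :=
  let n := phones.length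
  let r := (PySem.List.enumerate phones).foldl (pvBStep canonical) ([], [], 0)
  (r.1 ++ List.replicate (((n : Int) - r.2.2)).toNat (none : Option String),
   r.2.1 ++ List.replicate (((n : Int) - r.2.2)).toNat (none : Option String))

-- ===== PRECONDITION & SPEC =====
def Spec_next_content_cache_py (phones : List String) (canonical : List String) (out : List (Option String) × List (Option String)) : Prop := out = next_content_cache_py_alt phones canonical
instance (phones : List String) (canonical : List String) (out : List (Option String) × List (Option String)) : Decidable (Spec_next_content_cache_py phones canonical out) := by unfold Spec_next_content_cache_py; infer_instance

-- ===== CLAIM (what is proved, stated in full; the proofs are below) =====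
def Claim_equal_next_content_cache_py : Prop := ∀ (phones : List String) (canonical : List String), Dom_next_content_cache_py phones canonical → Spec_next_content_cache_py phones canonical (next_content_cache_py phones canonical)

-- ===== LEMMAS AND PROOFS =====

-- common characterisation: backward structural recursion producing
-- (next_content, next_canonical, ahead_symbol, ahead_canonical) for a suffix
def pvCore : List String → List String →
    List (Option String) × List (Option String) × Option String × Option String
  | [], _ => ([], [], none, none)
  | p :: ps, cs =>
    let r := pvCore ps cs.tail
    (r.2.2.1 :: r.1, r.2.2.2 :: r.2.1,
     if pvSilence p then r.2.2.1 else some p,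
     if pvSilence p then r.2.2.2 else cs.head?)

theorem pvGuard_eq_head? (canonical : List String) (k : Nat) :
    (if (k : Int) < (canonical.length : Int) then PySem.List.pyGet? canonical (k : Int) else none)
      = (canonical.drop k).head? := by
  rw [List.head?_drop]
  by_cases h : k < canonical.length
  · simp [h]
  · simp [h]

theorem pvSet_mid (k : Nat) (t : List (Option String)) (v : Option String) :
    (List.replicate (k + 1) (none : Option String) ++ t).set k v
      = List.replicate k (none : Option String) ++ v :: t := by
  have : List.replicate (k + 1) (none : Option String) ++ t
      = List.replicate k (none : Option String) ++ (none : Option String) :: t := by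
    rw [List.replicate_succ']; simp
  rw [this, List.set_append_right _ _ (by simp), List.length_replicate]
  simp

theorem pvA_inv (phones canonical : List String) (k : Nat) (h : k ≤ phones.length) :
    (PySem.List.pyRange (k : Int) (phones.length : Int) 1).foldr
        (fun idx st => pvAStep phones canonical st idx)
        (List.replicate phones.length (none : Option String),
         List.replicate phones.length (none : Option String),
         (none : Option String), (none : Option String))
      = (List.replicate k (none : Option String) ++ (pvCore (phones.drop k) (canonical.drop k)).1,
         List.replicate k (none : Option String) ++ (pvCore (phones.drop k) (canonical.drop k)).2.1,
         (pvCore (phones.drop k) (canonical.drop k)).2.2.1,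
         (pvCore (phones.drop k) (canonical.drop k)).2.2.2) := by
  induction hm : phones.length - k generalizing k with
  | zero =>
    have hk : k = phones.length := by omega
    subst hk
    rw [PySem.List.pyRange_one_eq_nil (by omega)]
    simp [pvCore, List.drop_length]
  | succ m ih =>
    have hk : k < phones.length := by omega
    rw [PySem.List.pyRange_one_cons (by exact_mod_cast hk)]
    have hcast : (k : Int) + 1 = ((k + 1 : Nat) : Int) := by push_cast; ring
    rw [List.foldr_cons, hcast, ih (k + 1) (by omega) (by omega)]
    have hdp : phones.drop k = phones[k] :: phones.drop (k + 1) :=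
      (List.drop_eq_getElem_cons hk)
    have hdc : (canonical.drop k).tail = canonical.drop (k + 1) := by
      rw [List.tail_drop]
    rw [hdp]
    simp only [pvCore, hdc]
    unfold pvAStep
    simp only [PySem.List.pyGetD_natCast, List.getD_eq_getElem?_getD,
      List.getElem?_eq_getElem hk, Option.getD_some, PySem.List.pySetD_natCast]
    rw [pvGuard_eq_head?]
    by_cases hs : pvSilence phones[k]
    · simp only [hs, if_true, pvSet_mid]
    · simp only [hs, if_false, pvSet_mid, Bool.false_eq_true]

theorem pvRep_succ (a b : Int) (h : b ≤ a) (v : Option String) :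
    List.replicate (a + 1 - b).toNat v = List.replicate (a - b).toNat v ++ [v] := by
  have : (a + 1 - b).toNat = (a - b).toNat + 1 := by omega
  rw [this, List.replicate_succ']

theorem pvB_inv (canonical : List String) (ps : List String) (k : Nat) (prev : Int)
    (nc0 ncan0 : List (Option String)) (hp : prev ≤ (k : Int)) :
    (let r := (PySem.List.enumerate ps (k : Int)).foldl (pvBStep canonical) (nc0, ncan0, prev)
     (r.1 ++ List.replicate (((k : Int) + ps.length - r.2.2)).toNat (none : Option String),
      r.2.1 ++ List.replicate (((k : Int) + ps.length - r.2.2)).toNat (none : Option String)))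
      = (nc0 ++ List.replicate ((k : Int) - prev).toNat (pvCore ps (canonical.drop k)).2.2.1
             ++ (pvCore ps (canonical.drop k)).1,
         ncan0 ++ List.replicate ((k : Int) - prev).toNat (pvCore ps (canonical.drop k)).2.2.2
             ++ (pvCore ps (canonical.drop k)).2.1) := by
  induction ps generalizing k prev nc0 ncan0 with
  | nil =>
    simp [PySem.List.enumerate_nil, pvCore]
  | cons p rest ih =>
    rw [PySem.List.enumerate_cons, List.foldl_cons]
    have hdc : (canonical.drop k).tail = canonical.drop (k + 1) := by rw [List.tail_drop]
    have hcast : (k : Int) + 1 = ((k + 1 : Nat) : Int) := by push_cast; ring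
    by_cases hs : pvSilence p
    · have hstep : pvBStep canonical (nc0, ncan0, prev) ((k : Int), p) = (nc0, ncan0, prev) := by
        simp [pvBStep, hs]
      rw [hstep]
      have hlen : (k : Int) + ((p :: rest).length : Int) = ((k + 1 : Nat) : Int) + (rest.length : Int) := by
        push_cast; simp; ring
      simp only [hlen, hcast]
      rw [ih (k + 1) prev nc0 ncan0 (by push_cast; omega)]
      simp only [pvCore, hdc, hs, if_true]
      rw [← hcast, pvRep_succ _ _ hp, pvRep_succ _ _ hp]
      simp
    · have hstep : pvBStep canonical (nc0, ncan0, prev) ((k : Int), p)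
          = (nc0 ++ List.replicate ((k : Int) - prev).toNat (some p),
             ncan0 ++ List.replicate ((k : Int) - prev).toNat ((canonical.drop k).head?),
             (k : Int)) := by
        simp only [pvBStep, hs, Bool.false_eq_true, if_false]
        rw [pvGuard_eq_head? canonical k]
      rw [hstep]
      have hlen : (k : Int) + ((p :: rest).length : Int) = ((k + 1 : Nat) : Int) + (rest.length : Int) := by
        push_cast; simp; ring
      simp only [hlen, hcast]
      rw [ih (k + 1) (k : Int) _ _ (by push_cast; omega)]
      simp only [pvCore, hdc, hs, Bool.false_eq_true, if_false]
      have h1 : ((((k : Nat) + 1 : Nat) : Int) - (k : Int)).toNat = 1 := by push_cast; omega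
      simp only [h1, List.replicate_one, List.append_assoc, List.singleton_append]

theorem pvA_eq_core (phones canonical : List String) :
    next_content_cache_py phones canonical
      = ((pvCore phones canonical).1, (pvCore phones canonical).2.1) := by
  simp only [next_content_cache_py]
  have hr : PySem.List.pyRange ((phones.length : Int) - 1) (-1) (-1)
      = (PySem.List.pyRange 0 (phones.length : Int) 1).reverse := by
    rw [PySem.List.pyRange_neg_one_eq_reverse]; norm_num
  rw [hr, List.foldl_reverse]
  have h0 : (0 : Int) = ((0 : Nat) : Int) := by norm_num
  rw [h0, pvA_inv phones canonical 0 (by omega)]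
  simp

theorem pvB_eq_core (phones canonical : List String) :
    next_content_cache_py_alt phones canonical
      = ((pvCore phones canonical).1, (pvCore phones canonical).2.1) := by
  simp only [next_content_cache_py_alt]
  have h := pvB_inv canonical phones 0 0 [] [] (by norm_num)
  simpa using h

-- ===== VERDICT (by name: the statement is the Claim_ definition above) =====
theorem next_content_cache_py_spec : Claim_equal_next_content_cache_py := by
  intro phones canonical _
  unfold Spec_next_content_cache_py
  rw [pvA_eq_core, pvB_eq_core]
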